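-- pv_equiv track=rewrite | github.com/hahahafeifeifei/PIGA | scripts/graph-construct/subgraph_paf_fa.py | filter_subgraph_info
-- ===== SOURCE A (Python) =====
-- def filter_subgraph_info(contig_subgraph_info):
--     filtered_contig_subgraph_info = [[], [], [], [], []]
--     for i in range(len(contig_subgraph_info[0])):
--         if contig_subgraph_info[4][i] != "":
--             subgraph = contig_subgraph_info[0][i]
--             source_node = contig_subgraph_info[1][i]
--             if filtered_contig_subgraph_info == [[]] * 5:
--                 filtered_contig_subgraph_info[0].append(subgraph)
--                 filtered_contig_subgraph_info[1].append(source_node)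
--             elif subgraph != filtered_contig_subgraph_info[0][-1]:
--                 filtered_contig_subgraph_info[2].append(last_sink_node)
--                 filtered_contig_subgraph_info[3].append(last_gl)
--                 filtered_contig_subgraph_info[4].append(last_end)
--                 filtered_contig_subgraph_info[0].append(subgraph)
--                 filtered_contig_subgraph_info[1].append(source_node)
--             last_sink_node = contig_subgraph_info[2][i]
--             last_gl = contig_subgraph_info[3][i]
--             last_end = contig_subgraph_info[4][i]
--     if len(filtered_contig_subgraph_info[0]) != 0:
--         filtered_contig_subgraph_info[2].append(last_sink_node)
--         filtered_contig_subgraph_info[3].append(last_gl)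
--         filtered_contig_subgraph_info[4].append(last_end)
--     return filtered_contig_subgraph_info
-- ===== SOURCE B (Python) =====
-- def filter_subgraph_info(contig_subgraph_info):
--     # Phase 1: collect the valid records (rows whose 'end' field is non-empty).
--     records = [(contig_subgraph_info[0][i], contig_subgraph_info[1][i],
--                 contig_subgraph_info[2][i], contig_subgraph_info[3][i],
--                 contig_subgraph_info[4][i])
--                for i in range(len(contig_subgraph_info[0]))
--                if contig_subgraph_info[4][i] != ""]
--     # Phase 2: one output row per maximal run of consecutive equal subgraph keys:
--     # the run's first record gives columns 0-1, its last record gives columns 2-4.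
--     out = [[], [], [], [], []]
--     rs = records
--     while rs:
--         r = rs[0]
--         k = 1
--         while k < len(rs) and rs[k][0] == r[0]:
--             k += 1
--         last = rs[k - 1]
--         out[0].append(r[0])
--         out[1].append(r[1])
--         out[2].append(last[2])
--         out[3].append(last[3])
--         out[4].append(last[4])
--         rs = rs[k:]
--     return out
-- ===== Notes on version B (the rewrite author's own statement) =====
-- stated objective: alternative
-- what changed: Replaces A's single stateful loop with pending last_* variables and a post-loop flush by a two-phase decomposition: first build the list of valid records (rows with non-empty end field), then emit one output row per maximal run of consecutive equal subgraph keys, taking columns 0-1 from the run's first record and columns 2-4 from its last.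
import Mathlib
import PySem

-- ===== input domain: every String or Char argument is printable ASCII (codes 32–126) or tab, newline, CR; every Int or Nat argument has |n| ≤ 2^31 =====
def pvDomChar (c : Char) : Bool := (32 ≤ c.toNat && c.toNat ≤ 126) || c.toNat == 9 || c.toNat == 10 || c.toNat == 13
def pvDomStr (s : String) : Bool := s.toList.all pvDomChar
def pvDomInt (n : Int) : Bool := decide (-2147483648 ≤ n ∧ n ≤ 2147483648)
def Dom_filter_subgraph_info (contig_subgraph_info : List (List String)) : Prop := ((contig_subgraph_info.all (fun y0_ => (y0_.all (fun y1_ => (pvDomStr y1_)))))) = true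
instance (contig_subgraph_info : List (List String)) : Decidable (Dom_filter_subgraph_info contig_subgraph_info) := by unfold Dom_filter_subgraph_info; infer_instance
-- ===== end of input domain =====

-- B replaces A's stateful single loop (pending last_* variables + post-loop flush) by a
-- two-phase decomposition: build the valid records, then emit one row per maximal run of
-- equal subgraph keys (objective: alternative; same cost).

-- ===== PORT A =====
-- cs[j][i] where both indices are known in range on Pre_ (default "" is never used there)
def pvGet (cs : List (List String)) (j i : Int) : String :=
  PySem.List.pyGetD (PySem.List.pyGetD cs j []) i ""

-- loop body of A: state = (the five output lists, the last_* variables (None before first valid row))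
def filterA_step (cs : List (List String))
    (st : (List String × List String × List String × List String × List String) × Option (String × String × String))
    (i : Int) :
    (List String × List String × List String × List String × List String) × Option (String × String × String) :=
  if pvGet cs 4 i ≠ "" then
    let subgraph := pvGet cs 0 i
    let source_node := pvGet cs 1 i
    let l := st.2.getD ("", "", "")
    let out := st.1
    let out :=
      if out = ([], [], [], [], []) then
        (out.1 ++ [subgraph], out.2.1 ++ [source_node], out.2.2.1, out.2.2.2.1, out.2.2.2.2)
      else if subgraph ≠ PySem.List.pyGetD out.1 (-1) "" then
        (out.1 ++ [subgraph], out.2.1 ++ [source_node],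
         out.2.2.1 ++ [l.1], out.2.2.2.1 ++ [l.2.1], out.2.2.2.2 ++ [l.2.2])
      else out
    (out, some (pvGet cs 2 i, pvGet cs 3 i, pvGet cs 4 i))
  else st

-- A's post-loop flush of last_* and the final return value
def filterA_fin
    (st : (List String × List String × List String × List String × List String) × Option (String × String × String)) :
    List (List String) :=
  if st.1.1 ≠ [] then
    let l := st.2.getD ("", "", "")
    [st.1.1, st.1.2.1, st.1.2.2.1 ++ [l.1], st.1.2.2.2.1 ++ [l.2.1], st.1.2.2.2.2 ++ [l.2.2]]
  else [st.1.1, st.1.2.1, st.1.2.2.1, st.1.2.2.2.1, st.1.2.2.2.2]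

def filter_subgraph_info (contig_subgraph_info : List (List String)) : List (List String) :=
  filterA_fin
    ((PySem.List.pyRange 0 ((PySem.List.pyGetD contig_subgraph_info 0 []).length : Int) 1).foldl
      (filterA_step contig_subgraph_info) (([], [], [], [], []), none))

-- ===== PORT B =====
-- one valid row as a record (subgraph, source_node, sink_node, gl, end)
def recB (cs : List (List String)) (i : Int) : String × String × String × String × String :=
  (pvGet cs 0 i, pvGet cs 1 i, pvGet cs 2 i, pvGet cs 3 i, pvGet cs 4 i)

-- phase 1: the comprehension over range(len(cs[0])) keeping rows with cs[4][i] != ""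
def recordsB (cs : List (List String)) : List (String × String × String × String × String) :=
  (PySem.List.pyRange 0 ((PySem.List.pyGetD cs 0 []).length : Int) 1).foldl
    (fun acc i => if pvGet cs 4 i ≠ "" then acc ++ [recB cs i] else acc) []

-- phase 2: peel off one maximal run of equal subgraph keys per step (Source B's while loops)
def runsB : List (String × String × String × String × String) →
    List String × List String × List String × List String × List String
  | [] => ([], [], [], [], [])
  | r :: rs =>
    let same := rs.takeWhile (fun s => s.1 == r.1)
    let rest := rs.dropWhile (fun s => s.1 == r.1)
    let lastR := ((r :: same).getLast?).getD r
    ((r.1 :: (runsB rest).1), (r.2.1 :: (runsB rest).2.1), (lastR.2.2.1 :: (runsB rest).2.2.1),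
     (lastR.2.2.2.1 :: (runsB rest).2.2.2.1), (lastR.2.2.2.2 :: (runsB rest).2.2.2.2))
termination_by rs => rs.length
decreasing_by
  simp only [List.length_cons]
  exact Nat.lt_succ_of_le (List.length_dropWhile_le _ _)

def filter_subgraph_info_alt (contig_subgraph_info : List (List String)) : List (List String) :=
  let g := runsB (recordsB contig_subgraph_info)
  [g.1, g.2.1, g.2.2.1, g.2.2.2.1, g.2.2.2.2]

-- ===== PRECONDITION & SPEC =====
-- Pre_ = exactly the inputs where the Python A returns: A raises IndexError when the outer
-- list is empty, or (as soon as the loop runs) when it has fewer than 5 columns, when column 4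
-- is shorter than column 0, or when a valid row index exceeds column 1, 2 or 3.
def Pre_filter_subgraph_info (contig_subgraph_info : List (List String)) : Prop :=
  contig_subgraph_info ≠ [] ∧
  ((contig_subgraph_info.headD []).length = 0 ∨
    (5 ≤ contig_subgraph_info.length ∧
     (contig_subgraph_info.headD []).length ≤ (contig_subgraph_info.getD 4 []).length ∧
     ∀ i < (contig_subgraph_info.headD []).length,
       (contig_subgraph_info.getD 4 []).getD i "" ≠ "" →
         i < (contig_subgraph_info.getD 1 []).length ∧
         i < (contig_subgraph_info.getD 2 []).length ∧
         i < (contig_subgraph_info.getD 3 []).length))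
instance (contig_subgraph_info : List (List String)) : Decidable (Pre_filter_subgraph_info contig_subgraph_info) := by
  unfold Pre_filter_subgraph_info; infer_instance

def pvWitness_filter_subgraph_info : List (List String) :=
  [["s1", "s1", "s2"], ["a", "b", "c"], ["x", "y", "z"], ["g1", "g2", "g3"], ["e1", "", "e3"]]

def Spec_filter_subgraph_info (contig_subgraph_info : List (List String)) (out : List (List String)) : Prop := out = filter_subgraph_info_alt contig_subgraph_info
instance (contig_subgraph_info : List (List String)) (out : List (List String)) : Decidable (Spec_filter_subgraph_info contig_subgraph_info out) := by unfold Spec_filter_subgraph_info; infer_instance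

-- ===== CLAIM (what is proved, stated in full; the proofs are below) =====
def Claim_equal_filter_subgraph_info : Prop := ∀ (contig_subgraph_info : List (List String)), Dom_filter_subgraph_info contig_subgraph_info → Pre_filter_subgraph_info contig_subgraph_info → Spec_filter_subgraph_info contig_subgraph_info (filter_subgraph_info contig_subgraph_info)

-- ===== LEMMAS AND PROOFS =====

-- the last_* projection of a record
def projT (r : String × String × String × String × String) : String × String × String :=
  (r.2.2.1, r.2.2.2.1, r.2.2.2.2)

-- validity test on a record (column-4 field non-empty)
def vldR (r : String × String × String × String × String) : Bool := !(r.2.2.2.2 == "")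

-- A's loop body reformulated on a record
def stepR
    (st : (List String × List String × List String × List String × List String) × Option (String × String × String))
    (r : String × String × String × String × String) :
    (List String × List String × List String × List String × List String) × Option (String × String × String) :=
  if r.2.2.2.2 ≠ "" then
    let subgraph := r.1
    let source_node := r.2.1
    let l := st.2.getD ("", "", "")
    let out := st.1
    let out :=
      if out = ([], [], [], [], []) then
        (out.1 ++ [subgraph], out.2.1 ++ [source_node], out.2.2.1, out.2.2.2.1, out.2.2.2.2)
      else if subgraph ≠ PySem.List.pyGetD out.1 (-1) "" then
        (out.1 ++ [subgraph], out.2.1 ++ [source_node],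
         out.2.2.1 ++ [l.1], out.2.2.2.1 ++ [l.2.1], out.2.2.2.2 ++ [l.2.2])
      else out
    (out, some (r.2.2.1, r.2.2.2.1, r.2.2.2.2))
  else st

-- continuation spec: process rs given the open group's key k and the pending last_* l
def contk : List (String × String × String × String × String) → String → (String × String × String) →
    List String × List String × List String × List String × List String
  | [], _, l => ([], [], [l.1], [l.2.1], [l.2.2])
  | r :: rs, k, l =>
    if r.1 = k then contk rs k (projT r)
    else
      ((r.1 :: (contk rs r.1 (projT r)).1), (r.2.1 :: (contk rs r.1 (projT r)).2.1),
       (l.1 :: (contk rs r.1 (projT r)).2.2.1), (l.2.1 :: (contk rs r.1 (projT r)).2.2.2.1),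
       (l.2.2 :: (contk rs r.1 (projT r)).2.2.2.2))

theorem foldl_stepA_eq_map (cs : List (List String)) (idxs : List Int) (st) :
    idxs.foldl (filterA_step cs) st = (idxs.map (recB cs)).foldl stepR st := by
  rw [List.foldl_map]
  rfl

theorem foldl_stepR_filter (l : List (String × String × String × String × String)) (st) :
    l.foldl stepR st = (l.filter vldR).foldl stepR st := by
  induction l generalizing st with
  | nil => rfl
  | cons r rs ih =>
    by_cases h : r.2.2.2.2 = ""
    · have h1 : stepR st r = st := by simp [stepR, h]
      simp [List.filter_cons, vldR, h, h1, ih]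
    · simp [List.filter_cons, vldR, h, ih]

theorem records_closed (cs : List (List String)) (idxs : List Int) (acc) :
    idxs.foldl (fun acc i => if pvGet cs 4 i ≠ "" then acc ++ [recB cs i] else acc) acc =
      acc ++ ((idxs.map (recB cs)).filter vldR) := by
  induction idxs generalizing acc with
  | nil => simp
  | cons i rest ih =>
    rw [List.foldl_cons]
    by_cases h : pvGet cs 4 i = ""
    · have e : (if pvGet cs 4 i ≠ "" then acc ++ [recB cs i] else acc) = acc := if_neg (by simp [h])
      rw [e, ih, List.map_cons, List.filter_cons]
      simp [vldR, recB, h]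
    · have e : (if pvGet cs 4 i ≠ "" then acc ++ [recB cs i] else acc) = acc ++ [recB cs i] := if_pos h
      rw [e, ih, List.map_cons, List.filter_cons]
      simp [vldR, recB, h]

theorem getLast?_getD_cons {α : Type} (r : α) (xs : List α) (d : α) :
    ((r :: xs).getLast?).getD d = xs.getLast?.getD r := by
  cases h : xs.getLast? with
  | none => simp [List.getLast?_eq_none_iff.mp h]
  | some y =>
    have : (r :: xs).getLast? = some y := by
      cases xs with
      | nil => simp at h
      | cons a as => rw [List.getLast?_cons_cons, h]
    simp [this]

theorem getDLast (o : Option (String × String × String × String × String)) (r : String × String × String × String × String) :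
    ((o.map projT).getD r.2.2) = (o.getD r).2.2 := by
  cases o <;> rfl

theorem main_inv (R : List (String × String × String × String × String))
    (H : ∀ r ∈ R, r.2.2.2.2 ≠ "")
    (o0 o1 o2 o3 o4 : List String) (k : String) (l : String × String × String) :
    filterA_fin (R.foldl stepR ((o0 ++ [k], o1, o2, o3, o4), some l)) =
      [o0 ++ [k] ++ (contk R k l).1, o1 ++ (contk R k l).2.1, o2 ++ (contk R k l).2.2.1,
       o3 ++ (contk R k l).2.2.2.1, o4 ++ (contk R k l).2.2.2.2] := by
  induction R generalizing o0 o1 o2 o3 o4 k l with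
  | nil => simp [filterA_fin, contk]
  | cons r rs ih =>
    have hr : r.2.2.2.2 ≠ "" := H r (List.mem_cons_self)
    have H' : ∀ x ∈ rs, x.2.2.2.2 ≠ "" := fun x hx => H x (List.mem_cons_of_mem _ hx)
    have hne : ¬ ((o0 ++ [k], o1, o2, o3, o4) = (([] : List String), ([] : List String), ([] : List String), ([] : List String), ([] : List String))) := by
      simp
    by_cases hk : r.1 = k
    · have hstep : stepR ((o0 ++ [k], o1, o2, o3, o4), some l) r =
          ((o0 ++ [k], o1, o2, o3, o4), some (projT r)) := by
        simp [stepR, hr, hne, PySem.List.pyGetD_neg_one_append_singleton, hk, projT]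
      rw [List.foldl_cons, hstep, ih H', contk, if_pos hk]
    · have hstep : stepR ((o0 ++ [k], o1, o2, o3, o4), some l) r =
          (((o0 ++ [k]) ++ [r.1], o1 ++ [r.2.1], o2 ++ [l.1], o3 ++ [l.2.1], o4 ++ [l.2.2]), some (projT r)) := by
        simp [stepR, hr, hne, PySem.List.pyGetD_neg_one_append_singleton, hk, projT]
      rw [List.foldl_cons, hstep, ih H', contk, if_neg hk]
      simp

theorem contk_runs (R : List (String × String × String × String × String)) (k : String)
    (l : String × String × String) :
    contk R k l =
      ((runsB (R.dropWhile (fun s => s.1 == k))).1,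
       (runsB (R.dropWhile (fun s => s.1 == k))).2.1,
       ((((R.takeWhile (fun s => s.1 == k)).getLast?.map projT).getD l).1 :: (runsB (R.dropWhile (fun s => s.1 == k))).2.2.1),
       ((((R.takeWhile (fun s => s.1 == k)).getLast?.map projT).getD l).2.1 :: (runsB (R.dropWhile (fun s => s.1 == k))).2.2.2.1),
       ((((R.takeWhile (fun s => s.1 == k)).getLast?.map projT).getD l).2.2 :: (runsB (R.dropWhile (fun s => s.1 == k))).2.2.2.2)) := by
  induction R generalizing k l with
  | nil => simp [contk, runsB]
  | cons r rs ih =>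
    by_cases hk : r.1 = k
    · have hb : (r.1 == k) = true := beq_iff_eq.mpr hk
      rw [contk, if_pos hk, ih k (projT r)]
      rw [List.takeWhile_cons, List.dropWhile_cons]
      simp only [hb, if_true]
      have hm : ((r :: rs.takeWhile (fun s => s.1 == k)).getLast?.map projT).getD l =
          ((rs.takeWhile (fun s => s.1 == k)).getLast?.map projT).getD (projT r) := by
        cases h : (rs.takeWhile (fun s => s.1 == k)).getLast? with
        | none =>
          have : (r :: rs.takeWhile (fun s => s.1 == k)).getLast? = some r := by
            rw [List.getLast?_eq_none_iff.mp h]; rfl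
          simp [this]
        | some y =>
          have : (r :: rs.takeWhile (fun s => s.1 == k)).getLast? = some y := by
            cases hx : rs.takeWhile (fun s => s.1 == k) with
            | nil => rw [hx] at h; simp at h
            | cons a as => rw [hx] at h; rw [List.getLast?_cons_cons, h]
          simp [this]
      rw [hm]
    · have hb : (r.1 == k) = false := by simp [hk]
      rw [contk, if_neg hk, List.takeWhile_cons, List.dropWhile_cons]
      simp only [hb, Bool.false_eq_true, if_false]
      rw [ih r.1 (projT r), runsB]
      simp [getLast?_getD_cons, projT]
      simp [getDLast]


theorem runs_cons (r : String × String × String × String × String)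
    (rs : List (String × String × String × String × String)) :
    runsB (r :: rs) =
      ((r.1 :: (contk rs r.1 (projT r)).1), (r.2.1 :: (contk rs r.1 (projT r)).2.1),
       (contk rs r.1 (projT r)).2.2.1, (contk rs r.1 (projT r)).2.2.2.1,
       (contk rs r.1 (projT r)).2.2.2.2) := by
  rw [contk_runs, runsB]
  simp [getLast?_getD_cons, projT]
  simp [getDLast]


theorem ports_agree (cs : List (List String)) :
    filter_subgraph_info cs = filter_subgraph_info_alt cs := by
  have hrec : recordsB cs =
      (((PySem.List.pyRange 0 ((PySem.List.pyGetD cs 0 []).length : Int) 1).map (recB cs)).filter vldR) := by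
    rw [recordsB, records_closed]; rfl
  rw [filter_subgraph_info, foldl_stepA_eq_map, foldl_stepR_filter]
  rw [filter_subgraph_info_alt]
  rw [hrec]
  set R := (((PySem.List.pyRange 0 ((PySem.List.pyGetD cs 0 []).length : Int) 1).map (recB cs)).filter vldR) with hR
  have H : ∀ r ∈ R, r.2.2.2.2 ≠ "" := by
    intro r hrm
    have := List.of_mem_filter hrm
    simpa [vldR] using this
  cases hcase : R with
  | nil => simp [filterA_fin, runsB]
  | cons r rs =>
    have hr : r.2.2.2.2 ≠ "" := by rw [hcase] at H; exact H r (List.mem_cons_self)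
    have H' : ∀ x ∈ rs, x.2.2.2.2 ≠ "" := by
      rw [hcase] at H; exact fun x hx => H x (List.mem_cons_of_mem _ hx)
    have hstep : stepR ((([] : List String), ([] : List String), ([] : List String), ([] : List String), ([] : List String)), (none : Option (String × String × String))) r =
        ((([] : List String) ++ [r.1], [r.2.1], ([] : List String), ([] : List String), ([] : List String)), some (projT r)) := by
      simp [stepR, hr, projT]
    rw [List.foldl_cons, hstep, main_inv rs H' [] [r.2.1] [] [] [] r.1 (projT r), runs_cons]
    simp

-- ===== VERDICT (by name: the statement is the Claim_ definition above) =====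
theorem filter_subgraph_info_spec : Claim_equal_filter_subgraph_info := by
  intro cs _ _
  unfold Spec_filter_subgraph_info
  exact ports_agree cs
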